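-- pv_equiv track=rewrite | github.com/brunoberdinazzi/projectMatt | backend/app/services/excel_parser.py | _is_crawlable_reference_url
-- ===== SOURCE A (Python) =====
-- NON_CRAWLABLE_EXTENSIONS = {
--     ".pdf",
--     ".csv",
--     ".xls",
--     ".xlsx",
--     ".ods",
--     ".doc",
--     ".docx",
--     ".odt",
--     ".zip",
--     ".rar",
--     ".7z",
--     ".jpg",
--     ".jpeg",
--     ".png",
--     ".gif",
-- }
--
-- def _is_crawlable_reference_url(value: str) -> bool:
--     lowered = (value or "").strip().lower()
--     if not lowered.startswith(("http://", "https://")):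
--         return False
--     for extension in NON_CRAWLABLE_EXTENSIONS:
--         if lowered.endswith(extension):
--             return False
--     return True
-- ===== SOURCE B (Python) =====
-- NON_CRAWLABLE_EXTENSIONS = {
--     ".pdf", ".csv", ".xls", ".xlsx", ".ods", ".doc", ".docx", ".odt",
--     ".zip", ".rar", ".7z", ".jpg", ".jpeg", ".png", ".gif",
-- }
--
-- def _is_crawlable_reference_url(value: str) -> bool:
--     lowered = (value or "").strip().lower()
--     if not lowered.startswith(("http://", "https://")):
--         return False
--     ext = lowered.rsplit(".", 1)[-1]
--     return "." + ext not in NON_CRAWLABLE_EXTENSIONS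
-- ===== Notes on version B (the rewrite author's own statement) =====
-- stated objective: idiomatic
-- what changed: B extracts the substring after the last dot once with rsplit and does a single set-membership test instead of A's loop of endswith checks over every extension.
import Mathlib
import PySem

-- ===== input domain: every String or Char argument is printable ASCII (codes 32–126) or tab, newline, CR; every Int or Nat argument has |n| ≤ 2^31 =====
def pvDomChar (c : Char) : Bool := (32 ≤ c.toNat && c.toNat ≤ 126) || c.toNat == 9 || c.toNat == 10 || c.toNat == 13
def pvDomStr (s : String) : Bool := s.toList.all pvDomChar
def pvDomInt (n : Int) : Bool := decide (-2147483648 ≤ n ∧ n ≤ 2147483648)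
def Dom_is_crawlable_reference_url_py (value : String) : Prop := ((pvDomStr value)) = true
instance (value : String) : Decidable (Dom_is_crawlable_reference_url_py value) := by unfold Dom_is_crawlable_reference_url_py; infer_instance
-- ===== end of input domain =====

-- B replaces the loop of endswith tests by extracting the piece after the last '.' once and
-- doing a single set-membership test (idiomatic; equal on all inputs, equality proved below).

-- the module-level NON_CRAWLABLE_EXTENSIONS set (string literals, source order)
def pvNonCrawlableExtensions : List String :=
  [".pdf", ".csv", ".xls", ".xlsx", ".ods", ".doc", ".docx", ".odt",
   ".zip", ".rar", ".7z", ".jpg", ".jpeg", ".png", ".gif"]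

-- ===== PORT A =====
-- (value or "") = value for every str argument, so it is ported as value itself
def is_crawlable_reference_url_py (value : String) : Bool :=
  let lowered := PySem.Str.lower (PySem.Str.strip value)
  if !(PySem.Str.startswith lowered "http://" || PySem.Str.startswith lowered "https://") then
    false
  else if pvNonCrawlableExtensions.any (fun extension => PySem.Str.endswith lowered extension) then
    false
  else
    true

-- ===== PORT B =====
-- exact hand port of lowered.rsplit(".", 1)[-1]: the characters after the LAST '.'
-- (= the whole string when there is no '.'), computed by scanning the reversed char list
def pvAfterDotRev : List Char → List Char
  | [] => []
  | c :: cs => if c = '.' then [] else c :: pvAfterDotRev cs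

def is_crawlable_reference_url_py_alt (value : String) : Bool :=
  let lowered := PySem.Str.lower (PySem.Str.strip value)
  if !(PySem.Str.startswith lowered "http://" || PySem.Str.startswith lowered "https://") then
    false
  else
    let ext := (pvAfterDotRev lowered.toList.reverse).reverse
    !(pvNonCrawlableExtensions.contains (String.ofList ('.' :: ext)))

-- ===== PRECONDITION & SPEC =====
def Spec_is_crawlable_reference_url_py (value : String) (out : Bool) : Prop := out = is_crawlable_reference_url_py_alt value
instance (value : String) (out : Bool) : Decidable (Spec_is_crawlable_reference_url_py value out) := by unfold Spec_is_crawlable_reference_url_py; infer_instance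

-- ===== CLAIM (what is proved, stated in full; the proofs are below) =====
def Claim_equal_is_crawlable_reference_url_py : Prop := ∀ (value : String), Dom_is_crawlable_reference_url_py value → Spec_is_crawlable_reference_url_py value (is_crawlable_reference_url_py value)

-- ===== LEMMAS AND PROOFS =====

theorem pvAfterDotRev_append (e t : List Char) (h : '.' ∉ e) :
    pvAfterDotRev (e ++ '.' :: t) = e := by
  induction e with
  | nil => simp [pvAfterDotRev]
  | cons c cs ih =>
      simp only [List.mem_cons, not_or] at h
      simp [pvAfterDotRev, Ne.symm h.1, ih h.2]

theorem pvAfterDotRev_cases (r : List Char) :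
    ('.' ∉ r ∧ pvAfterDotRev r = r) ∨
    (∃ t, r = pvAfterDotRev r ++ '.' :: t ∧ '.' ∉ pvAfterDotRev r) := by
  induction r with
  | nil => left; simp [pvAfterDotRev]
  | cons c cs ih =>
      by_cases hc : c = '.'
      · right; exact ⟨cs, by simp [pvAfterDotRev, hc], by simp [pvAfterDotRev, hc]⟩
      · rcases ih with ⟨hmem, heq⟩ | ⟨t, heq, hmem⟩
        · left
          constructor
          · simp only [List.mem_cons, not_or]
            exact ⟨fun h => hc h.symm, hmem⟩
          · simp [pvAfterDotRev, hc, heq]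
        · right
          refine ⟨t, ?_, ?_⟩
          · simp [pvAfterDotRev, hc]; exact heq
          · simp [pvAfterDotRev, hc, hmem]
            exact fun h => hc h.symm

-- endswith ('.' :: e) coincides with "suffix after the last dot equals e",
-- provided e has no dot and l is separated from e by some character '/' ∈ l, '/' ∉ e
theorem pv_endswith_iff_ext (l e : List Char) (hd : '.' ∉ e) (hl : '/' ∈ l) (he : '/' ∉ e) :
    PySem.Chars.endswith l ('.' :: e) = true ↔ (pvAfterDotRev l.reverse).reverse = e := by
  rw [PySem.Chars.endswith_iff]
  constructor
  · rintro ⟨pre, rfl⟩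
    have hrev : (pre ++ '.' :: e).reverse = e.reverse ++ '.' :: pre.reverse := by
      simp
    rw [hrev, pvAfterDotRev_append _ _ (by simpa using hd)]
    simp
  · intro hext
    rcases pvAfterDotRev_cases l.reverse with ⟨_, heq⟩ | ⟨t, heq, _⟩
    · exfalso
      rw [heq, List.reverse_reverse] at hext
      exact he (hext ▸ hl)
    · refine ⟨t.reverse, ?_⟩
      have : l = (pvAfterDotRev l.reverse ++ '.' :: t).reverse := by
        rw [← heq, List.reverse_reverse]
      rw [this, ← hext]
      simp

-- one listed extension: endswith equals the membership comparison against it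
theorem pv_elem (l : List Char) (hl : '/' ∈ l) (s : String) (e : List Char)
    (hs : s.toList = '.' :: e) (hd : '.' ∉ e) (he : '/' ∉ e) :
    PySem.Chars.endswith l s.toList
      = (String.ofList ('.' :: (pvAfterDotRev l.reverse).reverse) == s) := by
  rw [hs]
  by_cases h : (pvAfterDotRev l.reverse).reverse = e
  · rw [(pv_endswith_iff_ext l e hd hl he).mpr h]
    simp [String.ofList_eq, hs, h]
  · have h1 : PySem.Chars.endswith l ('.' :: e) = false := by
      by_contra hb
      exact h ((pv_endswith_iff_ext l e hd hl he).mp (by simpa using hb))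
    rw [h1]
    simp [String.ofList_eq, hs, h]

theorem pv_any_eq_contains (lw : String) (hl : '/' ∈ lw.toList) :
    pvNonCrawlableExtensions.any (fun extension => PySem.Str.endswith lw extension)
      = pvNonCrawlableExtensions.contains
          (String.ofList ('.' :: (pvAfterDotRev lw.toList.reverse).reverse)) := by
  simp only [PySem.Str.endswith_eq]
  simp only [pvNonCrawlableExtensions, List.any_cons, List.any_nil, List.contains_cons,
    List.contains_nil,
    pv_elem lw.toList hl ".pdf" ['p','d','f'] (by decide) (by decide) (by decide),
    pv_elem lw.toList hl ".csv" ['c','s','v'] (by decide) (by decide) (by decide),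
    pv_elem lw.toList hl ".xls" ['x','l','s'] (by decide) (by decide) (by decide),
    pv_elem lw.toList hl ".xlsx" ['x','l','s','x'] (by decide) (by decide) (by decide),
    pv_elem lw.toList hl ".ods" ['o','d','s'] (by decide) (by decide) (by decide),
    pv_elem lw.toList hl ".doc" ['d','o','c'] (by decide) (by decide) (by decide),
    pv_elem lw.toList hl ".docx" ['d','o','c','x'] (by decide) (by decide) (by decide),
    pv_elem lw.toList hl ".odt" ['o','d','t'] (by decide) (by decide) (by decide),
    pv_elem lw.toList hl ".zip" ['z','i','p'] (by decide) (by decide) (by decide),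
    pv_elem lw.toList hl ".rar" ['r','a','r'] (by decide) (by decide) (by decide),
    pv_elem lw.toList hl ".7z" ['7','z'] (by decide) (by decide) (by decide),
    pv_elem lw.toList hl ".jpg" ['j','p','g'] (by decide) (by decide) (by decide),
    pv_elem lw.toList hl ".jpeg" ['j','p','e','g'] (by decide) (by decide) (by decide),
    pv_elem lw.toList hl ".png" ['p','n','g'] (by decide) (by decide) (by decide),
    pv_elem lw.toList hl ".gif" ['g','i','f'] (by decide) (by decide) (by decide)]

theorem pv_slash_of_startswith (lw : String)
    (h : (PySem.Str.startswith lw "http://" || PySem.Str.startswith lw "https://") = true) :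
    '/' ∈ lw.toList := by
  by_cases h1 : PySem.Str.startswith lw "http://" = true
  · have hp := (PySem.Chars.startswith_iff _ _).mp
      (by simpa using h1 : PySem.Chars.startswith lw.toList "http://".toList = true)
    exact hp.subset (by decide)
  · have h2 : PySem.Str.startswith lw "https://" = true := by
      cases hh : PySem.Str.startswith lw "https://" <;> simp_all
    have hp := (PySem.Chars.startswith_iff _ _).mp
      (by simpa using h2 : PySem.Chars.startswith lw.toList "https://".toList = true)
    exact hp.subset (by decide)

theorem pv_main_eq (value : String) :
    is_crawlable_reference_url_py value = is_crawlable_reference_url_py_alt value := by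
  unfold is_crawlable_reference_url_py is_crawlable_reference_url_py_alt
  simp only []
  cases hg : (PySem.Str.startswith (PySem.Str.lower (PySem.Str.strip value)) "http://"
      || PySem.Str.startswith (PySem.Str.lower (PySem.Str.strip value)) "https://") with
  | false => simp
  | true =>
      have hl := pv_slash_of_startswith _ hg
      have hkey := pv_any_eq_contains (PySem.Str.lower (PySem.Str.strip value)) hl
      rw [hkey]
      cases pvNonCrawlableExtensions.contains
          (String.ofList ('.' :: (pvAfterDotRev
            (PySem.Str.lower (PySem.Str.strip value)).toList.reverse).reverse)) <;> simp

-- ===== VERDICT (by name: the statement is the Claim_ definition above) =====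
theorem is_crawlable_reference_url_py_spec : Claim_equal_is_crawlable_reference_url_py := by
  intro value _
  unfold Spec_is_crawlable_reference_url_py
  exact pv_main_eq value
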